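-- pv_equiv track=rewrite | github.com/jaydenpersonnat/cs184-project | process.py | convert_traj
-- ===== SOURCE A (Python) =====
-- def convert_traj(trajectories):
--     lst = []
--     for patient in trajectories:
--         traj = trajectories[patient]
--         row = []
--         n = len(traj)
--         for i in range(0, n-2, 2):
--             row.append((traj[i], traj[i+1], traj[i+2]))
--
--         lst.append(row)
--
--     return lst
-- ===== SOURCE B (Python) =====
-- def convert_traj(trajectories):
--     return [list(zip(traj[0::2], traj[1::2], traj[2::2]))
--             for traj in trajectories.values()]
-- ===== Notes on version B (the rewrite author's own statement) =====
-- stated objective: idiomatic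
-- what changed: The index-stepping inner loop (range(0, n-2, 2) with traj[i], traj[i+1], traj[i+2]) is replaced by zipping three strided slices of each trajectory inside a comprehension over dict values; the shortest slice truncates the zip to exactly the triple count, so no index arithmetic remains.
import Mathlib
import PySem

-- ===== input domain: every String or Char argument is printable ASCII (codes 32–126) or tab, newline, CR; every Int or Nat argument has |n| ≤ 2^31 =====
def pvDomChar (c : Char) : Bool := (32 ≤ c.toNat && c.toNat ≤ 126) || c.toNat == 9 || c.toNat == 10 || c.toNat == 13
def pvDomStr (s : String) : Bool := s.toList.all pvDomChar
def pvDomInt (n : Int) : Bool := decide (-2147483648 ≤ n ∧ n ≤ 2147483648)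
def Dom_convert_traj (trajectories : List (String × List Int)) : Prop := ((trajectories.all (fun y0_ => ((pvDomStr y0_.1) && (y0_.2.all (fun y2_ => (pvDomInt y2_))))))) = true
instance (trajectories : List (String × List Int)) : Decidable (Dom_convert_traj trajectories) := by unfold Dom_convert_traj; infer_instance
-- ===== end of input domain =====

-- B replaces the index-stepping inner loop by zipping three strided slices of each
-- trajectory (traj[0::2], traj[1::2], traj[2::2]) inside a comprehension over the dict
-- values: more idiomatic, same cost.

-- ===== PORT A =====
def convert_traj (trajectories : List (String × List Int)) : List (List (Int × Int × Int)) :=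
  let d := PySem.Dict.ofList trajectories
  d.keys.foldl (fun lst patient =>
    let traj := d.getD patient []
    let n : Int := traj.length
    let row := (PySem.List.pyRange 0 (n - 2) 2).foldl
      (fun row i =>
        row ++ [(PySem.List.pyGetD traj i 0, PySem.List.pyGetD traj (i + 1) 0,
                 PySem.List.pyGetD traj (i + 2) 0)]) []
    lst ++ [row]) []

-- ===== PORT B =====
-- zip(a, b, c) of three lists is ported as a.zip (b.zip c): a Python 3-tuple is the
-- right-nested product Int × Int × Int, so the element values agree exactly.
def convert_traj_alt (trajectories : List (String × List Int)) : List (List (Int × Int × Int)) :=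
  (PySem.Dict.ofList trajectories).values.map (fun traj =>
    ((PySem.List.slice? traj (some 0) none 2).getD []).zip
      (((PySem.List.slice? traj (some 1) none 2).getD []).zip
        ((PySem.List.slice? traj (some 2) none 2).getD [])))

-- ===== PRECONDITION & SPEC =====
def Spec_convert_traj (trajectories : List (String × List Int)) (out : List (List (Int × Int × Int))) : Prop := out = convert_traj_alt trajectories
instance (trajectories : List (String × List Int)) (out : List (List (Int × Int × Int))) : Decidable (Spec_convert_traj trajectories out) := by unfold Spec_convert_traj; infer_instance

-- ===== CLAIM (what is proved, stated in full; the proofs are below) =====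
def Claim_equal_convert_traj : Prop := ∀ (trajectories : List (String × List Int)), Dom_convert_traj trajectories → Spec_convert_traj trajectories (convert_traj trajectories)

-- ===== LEMMAS AND PROOFS =====

-- the k-th strided slice xs[k::2], as a map over List.range (proof-side normal form)
def stride (xs : List Int) (k : Nat) : List Int :=
  (List.range (((xs.length : Int) - k + 1) / 2).toNat).map (fun j => xs.getD (k + 2 * j) 0)

-- append-singleton foldl is map (accumulated from the left)
theorem foldl_push_map {α β : Type} (f : α → β) (l : List α) (acc : List β) :
    l.foldl (fun r x => r ++ [f x]) acc = acc ++ l.map f := by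
  induction l generalizing acc with
  | nil => simp
  | cons x xs ih => simp [ih]

theorem filterMap_some_eq_map {α β : Type} (f : α → β) (l : List α) :
    l.filterMap (fun x => some (f x)) = l.map f := by
  induction l with
  | nil => rfl
  | cons x xs ih => simp [ih]

theorem slice2_eq (xs : List Int) (k : Nat) :
    (PySem.List.slice? xs (some (k : Int)) none 2).getD [] = stride xs k := by
  simp only [PySem.List.slice?, PySem.List.sliceIndices, stride]
  rw [if_neg (by norm_num : ¬ (2 : Int) = 0)]
  simp only [if_neg (show ¬ ((2 : Int) < 0) by norm_num),
    if_pos (show (0 : Int) < 2 by norm_num),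
    if_neg (show ¬ ((k : Int) < 0) by omega), Option.getD_some]
  have hC : (if min (k : Int) (xs.length : Int) < (xs.length : Int)
      then (((xs.length : Int) - min (k : Int) (xs.length : Int) + 2 - 1) / 2).toNat else 0)
      = (((xs.length : Int) - k + 1) / 2).toNat := by
    split_ifs <;> omega
  rw [hC]
  have hmem : ∀ j ∈ List.range (((xs.length : Int) - k + 1) / 2).toNat,
      xs[(min (k : Int) (xs.length : Int) + 2 * (j : Int)).toNat]?
        = some (xs.getD (k + 2 * j) 0) := by
    intro j hj
    rw [List.mem_range] at hj
    have hlt : k + 2 * j < xs.length := by omega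
    have hidx : (min (k : Int) (xs.length : Int) + 2 * (j : Int)).toNat = k + 2 * j := by
      omega
    rw [hidx, List.getElem?_eq_getElem hlt, List.getD_eq_getElem _ _ hlt]
  rw [List.filterMap_congr hmem, filterMap_some_eq_map]

theorem slice2_zero (xs : List Int) :
    (PySem.List.slice? xs (some 0) none 2).getD [] = stride xs 0 := by
  simpa using slice2_eq xs 0

theorem slice2_one (xs : List Int) :
    (PySem.List.slice? xs (some 1) none 2).getD [] = stride xs 1 := by
  simpa using slice2_eq xs 1

theorem slice2_two (xs : List Int) :
    (PySem.List.slice? xs (some 2) none 2).getD [] = stride xs 2 := by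
  simpa using slice2_eq xs 2

-- one trajectory: A's inner loop equals B's zip of the three strided slices
theorem row_eq (xs : List Int) :
    (PySem.List.pyRange 0 ((xs.length : Int) - 2) 2).foldl
        (fun row i => row ++ [(PySem.List.pyGetD xs i 0, PySem.List.pyGetD xs (i + 1) 0,
                               PySem.List.pyGetD xs (i + 2) 0)]) []
      = ((PySem.List.slice? xs (some 0) none 2).getD []).zip
          (((PySem.List.slice? xs (some 1) none 2).getD []).zip
            ((PySem.List.slice? xs (some 2) none 2).getD [])) := by
  rw [foldl_push_map, List.nil_append,
      PySem.List.pyRange_of_pos 0 ((xs.length : Int) - 2) (by norm_num),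
      slice2_zero, slice2_one, slice2_two]
  apply List.ext_getElem
  · simp only [List.length_map, List.length_range, List.length_zip, stride]
    split_ifs <;> omega
  · intro i h1 h2
    simp only [List.getElem_map, List.getElem_range, List.getElem_zip, stride]
    rw [PySem.List.pyGetD_of_nonneg (h := by omega),
        PySem.List.pyGetD_of_nonneg (h := by omega),
        PySem.List.pyGetD_of_nonneg (h := by omega)]
    have e0 : ((0 : Int) + 2 * (i : Int)).toNat = 0 + 2 * i := by omega
    have e1 : ((0 : Int) + 2 * (i : Int) + 1).toNat = 1 + 2 * i := by omega
    have e2 : ((0 : Int) + 2 * (i : Int) + 2).toNat = 2 + 2 * i := by omega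
    rw [e0, e1, e2]

theorem convert_traj_spec : Claim_equal_convert_traj := by
  intro t _
  unfold Spec_convert_traj
  simp only [convert_traj, convert_traj_alt]
  rw [foldl_push_map, List.nil_append,
      PySem.Dict.values_eq_map_keys (PySem.Dict.ofList t) (PySem.Dict.nodup_keys_ofList t) [],
      List.map_map]
  refine List.map_congr_left ?_
  intro p _
  exact row_eq ((PySem.Dict.ofList t).getD p [])
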